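-- pv_equiv track=rewrite | github.com/mpettersson/PythonReview | questions/list_and_recursion/find_largest_square_submatrix.py | find_largest_square_submatrix_dp
-- ===== SOURCE A (Python) =====
-- def find_largest_square_submatrix_dp(m, k):
--     if m is not None and k is not None:
--         tab = [[0 for _ in r] for r in m]
--         max_size = 0
--         start_r = start_c = None
--         for r in range(len(m)):
--             for c in range(len(m[r])):
--                 if m[r][c] == k:
--                     tab[r][c] = 1 if r == 0 or c == 0 else min(tab[r-1][c-1], tab[r][c-1], tab[r-1][c]) + 1
--                     if tab[r][c] > max_size:
--                         max_size = tab[r][c]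
--                         start_r, start_c = r - max_size, c - max_size
--         return max_size  # Could also return start row and column: return max_size, start_r, start_c
-- ===== SOURCE B (Python) =====
-- def find_largest_square_submatrix_dp(m, k):
--     if m is not None and k is not None:
--         rows = len(m)
--         width = 0
--         for row in m:
--             if len(row) > width:
--                 width = len(row)
--         # ps[i][j] = number of k-cells in the rectangle of the first i rows and first j columns
--         ps = [[0] * (width + 1) for _ in range(rows + 1)]
--         for i in range(rows):
--             for j in range(width):
--                 v = 1 if j < len(m[i]) and m[i][j] == k else 0
--                 ps[i + 1][j + 1] = v + ps[i][j + 1] + ps[i + 1][j] - ps[i][j]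
--         best = 0
--         for r in range(rows):
--             for c in range(len(m[r])):
--                 while (best <= r and best <= c and
--                        ps[r + 1][c + 1] - ps[r - best][c + 1]
--                        - ps[r + 1][c - best] + ps[r - best][c - best]
--                        == (best + 1) * (best + 1)):
--                     best += 1
--         return best
-- ===== Notes on version B (the rewrite author's own statement) =====
-- stated objective: alternative
-- what changed: Replaces the min-of-three DP table by a 2-D prefix-sum table of k-cell counts plus a running-champion scan that extends the current best side at each cell via O(1) rectangle-sum queries.
import Mathlib
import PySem

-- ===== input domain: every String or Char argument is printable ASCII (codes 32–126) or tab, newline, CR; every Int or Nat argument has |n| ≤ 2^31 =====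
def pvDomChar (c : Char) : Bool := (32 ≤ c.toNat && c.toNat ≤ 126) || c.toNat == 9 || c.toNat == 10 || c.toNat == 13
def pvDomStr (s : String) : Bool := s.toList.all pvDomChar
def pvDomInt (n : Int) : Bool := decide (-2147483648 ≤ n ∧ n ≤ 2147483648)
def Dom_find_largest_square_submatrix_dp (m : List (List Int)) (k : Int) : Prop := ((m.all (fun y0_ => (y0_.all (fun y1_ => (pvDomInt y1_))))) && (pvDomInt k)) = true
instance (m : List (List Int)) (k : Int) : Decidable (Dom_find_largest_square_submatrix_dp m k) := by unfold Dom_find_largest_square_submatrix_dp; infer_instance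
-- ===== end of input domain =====

-- B replaces A's min-of-three DP table by a 2-D prefix-sum table of k-cell counts plus a
-- running-champion scan using O(1) rectangle-sum queries (objective: alternative algorithm).

-- ===== PORT A =====
-- shared helpers: read/write entry (r,c) of a list-of-lists (indices in range on admitted inputs)
def pvGet2 (t : List (List Int)) (r c : Nat) : Int := (t.getD r []).getD c 0

def pvSet2 (t : List (List Int)) (r c : Nat) (v : Int) : List (List Int) :=
  t.set r ((t.getD r []).set c v)

-- one iteration of A's inner loop body, state = (tab, max_size, start_r, start_c)
def pvStepA (m : List (List Int)) (k : Int) (r c : Nat)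
    (σ : List (List Int) × Int × Option Int × Option Int) :
    List (List Int) × Int × Option Int × Option Int :=
  let (tab, ms, sr, sc) := σ
  if pvGet2 m r c = k then
    let t : Int := if r = 0 ∨ c = 0 then 1
      else min (min (pvGet2 tab (r-1) (c-1)) (pvGet2 tab r (c-1))) (pvGet2 tab (r-1) c) + 1
    let tab' := pvSet2 tab r c t
    if ms < t then (tab', t, some ((r : Int) - t), some ((c : Int) - t)) else (tab', ms, sr, sc)
  else (tab, ms, sr, sc)

def find_largest_square_submatrix_dp (m : List (List Int)) (k : Int) : Int :=
  let tab0 := m.map (fun r => r.map (fun _ => (0 : Int)))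
  let σ := (List.range m.length).foldl
    (fun σ r => (List.range (m.getD r []).length).foldl (fun σ c => pvStepA m k r c σ) σ)
    (tab0, 0, (none : Option Int), (none : Option Int))
  σ.2.1

-- ===== PORT B =====
-- one iteration of B's prefix-sum build loop
def pvPsStep (m : List (List Int)) (k : Int) (i j : Nat) (ps : List (List Int)) : List (List Int) :=
  let v : Int := if j < (m.getD i []).length ∧ (m.getD i []).getD j 0 = k then 1 else 0
  pvSet2 ps (i+1) (j+1) (v + pvGet2 ps i (j+1) + pvGet2 ps (i+1) j - pvGet2 ps i j)

-- B's while loop: extend the champion while the (best+1)-square ending at (r,c) is all k.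
-- fuel bounds the iterations (the condition forces best ≤ r, so r+2 iterations always suffice).
def pvGrow (ps : List (List Int)) (r c : Nat) : Nat → Nat → Nat
  | 0, best => best
  | fuel+1, best =>
    if best ≤ r ∧ best ≤ c ∧
        pvGet2 ps (r+1) (c+1) - pvGet2 ps (r-best) (c+1) - pvGet2 ps (r+1) (c-best)
          + pvGet2 ps (r-best) (c-best) = ((best : Int)+1) * ((best : Int)+1)
    then pvGrow ps r c fuel (best+1) else best

def find_largest_square_submatrix_dp_alt (m : List (List Int)) (k : Int) : Int :=
  let rows := m.length
  let width := m.foldl (fun w row => max w row.length) 0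
  let ps0 := List.replicate (rows+1) (List.replicate (width+1) (0 : Int))
  let ps := (List.range rows).foldl
    (fun ps i => (List.range width).foldl (fun ps j => pvPsStep m k i j ps) ps) ps0
  let best := (List.range rows).foldl
    (fun b r => (List.range (m.getD r []).length).foldl (fun b c => pvGrow ps r c (r+2) b) b) 0
  (best : Int)

-- ===== PRECONDITION & SPEC =====
-- Pre_ excludes exactly the inputs where A raises IndexError: a k-cell at (r,c) with r,c > 0
-- whose previous row is too short (c ≥ len(m[r-1])), so A reads tab[r-1][c] out of range.
def Pre_find_largest_square_submatrix_dp (m : List (List Int)) (k : Int) : Prop :=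
  ((List.range m.length).all fun r => (List.range (m.getD r []).length).all fun c =>
    (decide (r = 0) || decide (c = 0) || decide ((m.getD r []).getD c 0 ≠ k) ||
      decide (c < (m.getD (r-1) []).length))) = true

instance (m : List (List Int)) (k : Int) : Decidable (Pre_find_largest_square_submatrix_dp m k) := by
  unfold Pre_find_largest_square_submatrix_dp; infer_instance

def pvWitness_find_largest_square_submatrix_dp : List (List Int) × Int := ([[1, 2], [2, 1]], 1)

def Spec_find_largest_square_submatrix_dp (m : List (List Int)) (k : Int) (out : Int) : Prop := out = find_largest_square_submatrix_dp_alt m k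
instance (m : List (List Int)) (k : Int) (out : Int) : Decidable (Spec_find_largest_square_submatrix_dp m k out) := by unfold Spec_find_largest_square_submatrix_dp; infer_instance

-- ===== CLAIM (what is proved, stated in full; the proofs are below) =====
def Claim_equal_find_largest_square_submatrix_dp : Prop := ∀ (m : List (List Int)) (k : Int), Dom_find_largest_square_submatrix_dp m k → Pre_find_largest_square_submatrix_dp m k → Spec_find_largest_square_submatrix_dp m k (find_largest_square_submatrix_dp m k)

-- ===== LEMMAS AND PROOFS =====

-- the precondition, read as the statement "no k-cell's previous row is too short"
theorem Pre_iff (m : List (List Int)) (k : Int) :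
    Pre_find_largest_square_submatrix_dp m k ↔
      ∀ r < m.length, ∀ c < (m.getD r []).length,
        0 < r → 0 < c → (m.getD r []).getD c 0 = k → c < (m.getD (r-1) []).length := by
  unfold Pre_find_largest_square_submatrix_dp
  rw [List.all_eq_true]
  constructor
  · intro h r hr c hc hr0 hc0 hk
    have hh := h r (List.mem_range.2 hr)
    rw [List.all_eq_true] at hh
    have hh2 := hh c (List.mem_range.2 hc)
    simp only [Bool.or_eq_true, decide_eq_true_eq] at hh2
    rcases hh2 with ((h1 | h1) | h1) | h1
    · omega
    · omega
    · exact absurd hk h1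
    · exact h1
  · intro h r hr
    rw [List.all_eq_true]
    intro c hc
    rw [List.mem_range] at hr
    rw [List.mem_range] at hc
    simp only [Bool.or_eq_true, decide_eq_true_eq]
    by_cases h1 : 0 < r
    · by_cases h2 : 0 < c
      · by_cases h3 : (m.getD r []).getD c 0 = k
        · exact Or.inr (h r hr c hc h1 h2 h3)
        · exact Or.inl (Or.inr h3)
      · exact Or.inl (Or.inl (Or.inr (by omega)))
    · exact Or.inl (Or.inl (Or.inl (by omega)))

-- cell (r,c) exists and holds k
def cellKb (m : List (List Int)) (k : Int) (r c : Nat) : Bool :=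
  decide (r < m.length) && decide (c < (m.getD r []).length) && ((m.getD r []).getD c 0 == k)

-- the s×s square of cells ending (bottom-right) at (r,c) fits and is all k
def sqKb (m : List (List Int)) (k : Int) (r c s : Nat) : Bool :=
  decide (s ≤ r+1) && decide (s ≤ c+1) &&
    (List.range s).all (fun i => (List.range s).all (fun j => cellKb m k (r-i) (c-j)))

-- side length of the largest all-k square ending at (r,c)
def side (m : List (List Int)) (k : Int) (r c : Nat) : Nat :=
  Nat.findGreatest (fun s => sqKb m k r c s = true) (min r c + 1)

-- the common reference value: max of side over all cells, in A's and B's traversal order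
def ref (m : List (List Int)) (k : Int) : Nat :=
  (List.range m.length).foldl
    (fun b r => (List.range (m.getD r []).length).foldl (fun b c => max b (side m k r c)) b) 0

-- basic facts about cellKb / sqKb / side ------------------------------------

theorem sqKb_iff (m : List (List Int)) (k : Int) (r c s : Nat) :
    sqKb m k r c s = true ↔
      s ≤ r+1 ∧ s ≤ c+1 ∧ ∀ i < s, ∀ j < s, cellKb m k (r-i) (c-j) = true := by
  simp [sqKb, List.all_eq_true, List.mem_range, and_assoc]

theorem sq_mono {m : List (List Int)} {k : Int} {r c s s' : Nat}
    (h : sqKb m k r c s = true) (hle : s' ≤ s) : sqKb m k r c s' = true := by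
  rw [sqKb_iff] at h ⊢
  exact ⟨by omega, by omega, fun i hi j hj => h.2.2 i (by omega) j (by omega)⟩

theorem sq_zero (m : List (List Int)) (k : Int) (r c : Nat) : sqKb m k r c 0 = true := by
  simp [sqKb]

theorem sq_one (m : List (List Int)) (k : Int) (r c : Nat) :
    sqKb m k r c 1 = true ↔ cellKb m k r c = true := by
  rw [sqKb_iff]
  constructor
  · intro h; simpa using h.2.2 0 (by omega) 0 (by omega)
  · intro h; exact ⟨by omega, by omega, fun i hi j hj => by
      have : i = 0 := by omega
      have : j = 0 := by omega
      simp_all⟩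

theorem sq_succ {m : List (List Int)} {k : Int} {r c : Nat} (s : Nat)
    (hr : 0 < r) (hc : 0 < c) :
    sqKb m k r c (s+1) = true ↔
      cellKb m k r c = true ∧ sqKb m k (r-1) (c-1) s = true ∧
        sqKb m k r (c-1) s = true ∧ sqKb m k (r-1) c s = true := by
  simp only [sqKb_iff]
  constructor
  · rintro ⟨h1, h2, h3⟩
    refine ⟨by simpa using h3 0 (by omega) 0 (by omega), ⟨by omega, by omega, ?_⟩,
      ⟨by omega, by omega, ?_⟩, ⟨by omega, by omega, ?_⟩⟩
    · intro i hi j hj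
      have e1 : r - 1 - i = r - (i+1) := by omega
      have e2 : c - 1 - j = c - (j+1) := by omega
      rw [e1, e2]; exact h3 (i+1) (by omega) (j+1) (by omega)
    · intro i hi j hj
      have e2 : c - 1 - j = c - (j+1) := by omega
      rw [e2]; exact h3 i (by omega) (j+1) (by omega)
    · intro i hi j hj
      have e1 : r - 1 - i = r - (i+1) := by omega
      rw [e1]; exact h3 (i+1) (by omega) j (by omega)
  · rintro ⟨hcell, ⟨hb1, hb2, h1⟩, ⟨_, _, h2⟩, ⟨_, _, h3⟩⟩
    refine ⟨by omega, by omega, ?_⟩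
    intro i hi j hj
    rcases Nat.eq_zero_or_pos i with hi0 | hi0 <;> rcases Nat.eq_zero_or_pos j with hj0 | hj0
    · simp_all
    · have e2 : c - j = c - 1 - (j-1) := by omega
      subst hi0; rw [e2]; simpa using h2 0 (by omega) (j-1) (by omega)
    · have e1 : r - i = r - 1 - (i-1) := by omega
      subst hj0; rw [e1]; simpa using h3 (i-1) (by omega) 0 (by omega)
    · have e1 : r - i = r - 1 - (i-1) := by omega
      have e2 : c - j = c - 1 - (j-1) := by omega
      rw [e1, e2]; exact h1 (i-1) (by omega) (j-1) (by omega)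

theorem side_le (m : List (List Int)) (k : Int) (r c : Nat) : side m k r c ≤ min r c + 1 := by
  unfold side; exact Nat.findGreatest_le _

theorem sq_side (m : List (List Int)) (k : Int) (r c : Nat) :
    sqKb m k r c (side m k r c) = true := by
  unfold side
  exact Nat.findGreatest_spec (P := fun s => sqKb m k r c s = true) (Nat.zero_le _) (sq_zero m k r c)

theorem le_side_iff {m : List (List Int)} {k : Int} {r c : Nat} (s : Nat) :
    s ≤ side m k r c ↔ sqKb m k r c s = true := by
  constructor
  · intro h; exact sq_mono (sq_side m k r c) h
  · intro h
    have hb := (sqKb_iff m k r c s).1 h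
    unfold side; exact Nat.le_findGreatest (by omega) h

theorem side_eq_of {m : List (List Int)} {k : Int} {r c s : Nat}
    (h1 : sqKb m k r c s = true) (h2 : sqKb m k r c (s+1) = false) : side m k r c = s := by
  have hle := (le_side_iff s).2 h1
  have : ¬ (s+1 ≤ side m k r c) := fun hx => by
    have := (le_side_iff (s+1)).1 hx; simp_all
  omega

theorem side_zero {m : List (List Int)} {k : Int} {r c : Nat}
    (h : cellKb m k r c = false) : side m k r c = 0 := by
  refine side_eq_of (sq_zero m k r c) ?_
  have := sq_one m k r c
  rcases hx : sqKb m k r c 1 with _ | _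
  · rfl
  · rw [hx] at this; simp_all

theorem side_edge {m : List (List Int)} {k : Int} {r c : Nat}
    (h : cellKb m k r c = true) (h0 : r = 0 ∨ c = 0) : side m k r c = 1 := by
  refine side_eq_of ((sq_one m k r c).2 h) ?_
  rcases hx : sqKb m k r c 2 with _ | _
  · rfl
  · have := (sqKb_iff m k r c 2).1 hx; omega

theorem side_rec {m : List (List Int)} {k : Int} {r c : Nat}
    (h : cellKb m k r c = true) (hr : 0 < r) (hc : 0 < c) :
    side m k r c =
      min (min (side m k (r-1) (c-1)) (side m k r (c-1))) (side m k (r-1) c) + 1 := by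
  set a := side m k (r-1) (c-1) with ha
  set b := side m k r (c-1) with hb
  set d := side m k (r-1) c with hd
  set n := min (min a b) d with hn
  refine side_eq_of ?_ ?_
  · exact (sq_succ n hr hc).2 ⟨h, sq_mono (sq_side _ _ _ _) (by omega),
      sq_mono (sq_side _ _ _ _) (by omega), sq_mono (sq_side _ _ _ _) (by omega)⟩
  · rcases hx : sqKb m k r c (n+1+1) with _ | _
    · rfl
    · exfalso
      have h4 := (sq_succ (n+1) hr hc).1 hx
      have l1 := (le_side_iff (n+1)).2 h4.2.1
      have l2 := (le_side_iff (n+1)).2 h4.2.2.1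
      have l3 := (le_side_iff (n+1)).2 h4.2.2.2
      omega

-- get/set lemmas for the 2-D helpers ----------------------------------------

theorem cellKb_iff (m : List (List Int)) (k : Int) (r c : Nat) :
    cellKb m k r c = true ↔ r < m.length ∧ c < (m.getD r []).length ∧ (m.getD r []).getD c 0 = k := by
  simp [cellKb, and_assoc]

theorem pvSet2_length (t : List (List Int)) (r c : Nat) (v : Int) :
    (pvSet2 t r c v).length = t.length := by
  simp [pvSet2]

theorem pvSet2_rowlen (t : List (List Int)) (r c : Nat) (v : Int) (r' : Nat) :
    ((pvSet2 t r c v).getD r' []).length = (t.getD r' []).length := by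
  by_cases h : r' = r
  · subst h
    by_cases hr : r' < t.length
    · simp [pvSet2, List.getD_eq_getElem?_getD, hr]
    · simp [pvSet2, List.getD_eq_getElem?_getD, hr]
  · simp [pvSet2, List.getD_eq_getElem?_getD, Ne.symm h]

theorem pvGet2_set2_self (t : List (List Int)) (r c : Nat) (v : Int)
    (hr : r < t.length) (hc : c < (t.getD r []).length) :
    pvGet2 (pvSet2 t r c v) r c = v := by
  have hc' : c < t[r].length := by
    rwa [List.getD_eq_getElem?_getD, List.getElem?_eq_getElem hr] at hc
  simp [pvGet2, pvSet2, List.getD_eq_getElem?_getD, hr, hc']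

theorem pvGet2_set2_ne (t : List (List Int)) (r c r' c' : Nat) (v : Int)
    (hne : ¬(r' = r ∧ c' = c)) :
    pvGet2 (pvSet2 t r c v) r' c' = pvGet2 t r' c' := by
  by_cases h : r' = r
  · subst h
    have hcc : c' ≠ c := fun hx => hne ⟨rfl, hx⟩
    by_cases hr : r' < t.length
    · simp [pvGet2, pvSet2, List.getD_eq_getElem?_getD, hr, Ne.symm hcc]
    · simp [pvGet2, pvSet2, List.getD_eq_getElem?_getD, hr]
  · simp [pvGet2, pvSet2, List.getD_eq_getElem?_getD, Ne.symm h]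

-- A's loop invariant: tab holds `side` at every processed cell (row-major order), 0 elsewhere
def TabInv (m : List (List Int)) (k : Int) (tab : List (List Int)) (r c : Nat) : Prop :=
  tab.length = m.length ∧
  (∀ r' < m.length, (tab.getD r' []).length = (m.getD r' []).length) ∧
  (∀ r' < m.length, ∀ c' < (m.getD r' []).length,
    pvGet2 tab r' c' = if r' < r ∨ (r' = r ∧ c' < c) then (side m k r' c' : Int) else 0)

theorem stepA_correct (m : List (List Int)) (k : Int)
    (hpre : Pre_find_largest_square_submatrix_dp m k)
    {r c : Nat} (hr : r < m.length) (hc : c < (m.getD r []).length)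
    {tab : List (List Int)} {ms : Int} {sr sc : Option Int} {N : Nat}
    (hinv : TabInv m k tab r c) (hms : ms = (N : Int)) :
    TabInv m k (pvStepA m k r c (tab, ms, sr, sc)).1 r (c+1) ∧
    (pvStepA m k r c (tab, ms, sr, sc)).2.1 = ((max N (side m k r c) : Nat) : Int) := by
  obtain ⟨hlen, hrow, hval⟩ := hinv
  by_cases hk : pvGet2 m r c = k
  · -- the cell holds k
    have hcell : cellKb m k r c = true := (cellKb_iff m k r c).2 ⟨hr, hc, hk⟩
    have ht : (if r = 0 ∨ c = 0 then (1 : Int)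
        else min (min (pvGet2 tab (r-1) (c-1)) (pvGet2 tab r (c-1))) (pvGet2 tab (r-1) c) + 1)
        = ((side m k r c : Nat) : Int) := by
      by_cases h0 : r = 0 ∨ c = 0
      · rw [if_pos h0, side_edge hcell h0]; norm_num
      · have hr0 : 0 < r := by omega
        have hc0 : 0 < c := by omega
        have hprev : c < (m.getD (r-1) []).length := (Pre_iff m k).1 hpre r hr c hc hr0 hc0 hk
        have e1 : pvGet2 tab (r-1) (c-1) = ((side m k (r-1) (c-1) : Nat) : Int) := by
          rw [hval (r-1) (by omega) (c-1) (by omega), if_pos (by omega)]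
        have e2 : pvGet2 tab r (c-1) = ((side m k r (c-1) : Nat) : Int) := by
          rw [hval r hr (c-1) (by omega), if_pos (by omega)]
        have e3 : pvGet2 tab (r-1) c = ((side m k (r-1) c : Nat) : Int) := by
          rw [hval (r-1) (by omega) c hprev, if_pos (by omega)]
        rw [if_neg h0, e1, e2, e3, side_rec hcell hr0 hc0]
        push_cast [Nat.cast_min]
        ring
    have hrt : r < tab.length := by omega
    have hct : c < (tab.getD r []).length := by rw [hrow r hr]; exact hc
    have htabinv : ∀ (t : Int), t = ((side m k r c : Nat) : Int) →
        TabInv m k (pvSet2 tab r c t) r (c+1) := by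
      intro t htt
      refine ⟨by rw [pvSet2_length]; exact hlen,
        fun r' h => by rw [pvSet2_rowlen]; exact hrow r' h, ?_⟩
      intro r' hr' c' hc'
      by_cases heq : r' = r ∧ c' = c
      · obtain ⟨h1, h2⟩ := heq; subst h1; subst h2
        rw [pvGet2_set2_self tab r' c' t hrt hct, if_pos (by omega), htt]
      · rw [pvGet2_set2_ne tab r c r' c' t heq, hval r' hr' c' hc']
        have : (r' < r ∨ (r' = r ∧ c' < c)) ↔ (r' < r ∨ (r' = r ∧ c' < c + 1)) := by
          constructor <;> intro h <;> omega
        rw [if_congr this rfl rfl]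
    constructor
    · show TabInv m k (pvStepA m k r c (tab, ms, sr, sc)).1 r (c+1)
      simp only [pvStepA, if_pos hk]
      rw [ht]
      split_ifs <;> exact htabinv _ rfl
    · show (pvStepA m k r c (tab, ms, sr, sc)).2.1 = _
      simp only [pvStepA, if_pos hk]
      rw [ht]
      split_ifs with hlt
      · show ((side m k r c : Nat) : Int) = _
        rw [hms] at hlt
        have hn : N < side m k r c := by exact_mod_cast hlt
        rw [Nat.max_eq_right hn.le]
      · show ms = _
        rw [hms] at hlt ⊢
        have hn : side m k r c ≤ N := by
          by_contra hgt
          exact hlt (by exact_mod_cast (by omega : N < side m k r c))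
        rw [Nat.max_eq_left hn]
  · -- the cell is not k: state unchanged, side is 0
    have hcell : cellKb m k r c = false := by
      rcases hx : cellKb m k r c with _ | _
      · rfl
      · exact absurd ((cellKb_iff m k r c).1 hx).2.2 hk
    have hside : side m k r c = 0 := side_zero hcell
    constructor
    · show TabInv m k (pvStepA m k r c (tab, ms, sr, sc)).1 r (c+1)
      simp only [pvStepA, if_neg hk]
      refine ⟨hlen, hrow, ?_⟩
      intro r' hr' c' hc'
      rw [hval r' hr' c' hc']
      by_cases heq : r' = r ∧ c' = c
      · obtain ⟨h1, h2⟩ := heq; subst h1; subst h2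
        rw [if_neg (by omega), if_pos (by omega), hside]; norm_num
      · have : (r' < r ∨ (r' = r ∧ c' < c)) ↔ (r' < r ∨ (r' = r ∧ c' < c + 1)) := by
          constructor <;> intro h <;> omega
        rw [if_congr this rfl rfl]
    · show (pvStepA m k r c (tab, ms, sr, sc)).2.1 = _
      simp only [pvStepA, if_neg hk]
      rw [hside, Nat.max_eq_left (Nat.zero_le _)]; exact hms

theorem foldInnerA (m : List (List Int)) (k : Int)
    (hpre : Pre_find_largest_square_submatrix_dp m k)
    {r : Nat} (hr : r < m.length) :
    ∀ (n : Nat), n ≤ (m.getD r []).length →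
    ∀ (σ : List (List Int) × Int × Option Int × Option Int) (N : Nat),
      TabInv m k σ.1 r 0 → σ.2.1 = (N : Int) →
      TabInv m k ((List.range n).foldl (fun σ c => pvStepA m k r c σ) σ).1 r n ∧
      ((List.range n).foldl (fun σ c => pvStepA m k r c σ) σ).2.1 =
        (((List.range n).foldl (fun b c => max b (side m k r c)) N : Nat) : Int) := by
  intro n
  induction n with
  | zero => intro _ σ N h1 h2; simpa using ⟨h1, h2⟩
  | succ n ih =>
    intro hn σ N h1 h2
    rw [List.range_succ, List.foldl_append, List.foldl_append]
    simp only [List.foldl_cons, List.foldl_nil]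
    obtain ⟨ihc1, ihc2⟩ := ih (by omega) σ N h1 h2
    rcases hσ : (List.range n).foldl (fun σ c => pvStepA m k r c σ) σ with ⟨tabn, msn, srn, scn⟩
    rw [hσ] at ihc1 ihc2
    exact stepA_correct m k hpre hr (by omega) ihc1 ihc2

theorem TabInv_advance {m : List (List Int)} {k : Int} {tab : List (List Int)} {r : Nat}
    (h : TabInv m k tab r ((m.getD r []).length)) : TabInv m k tab (r+1) 0 := by
  obtain ⟨h1, h2, h3⟩ := h
  refine ⟨h1, h2, ?_⟩
  intro r' hr' c' hc'
  rw [h3 r' hr' c' hc']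
  by_cases heq : r' = r
  · subst heq
    rw [if_pos (by omega), if_pos (by omega)]
  · have : (r' < r ∨ (r' = r ∧ c' < (m.getD r []).length)) ↔
        (r' < r + 1 ∨ (r' = r + 1 ∧ c' < 0)) := by
      constructor <;> intro h <;> omega
    rw [if_congr this rfl rfl]

theorem foldOuterA (m : List (List Int)) (k : Int)
    (hpre : Pre_find_largest_square_submatrix_dp m k) :
    ∀ (n : Nat), n ≤ m.length →
    ∀ (σ : List (List Int) × Int × Option Int × Option Int) (N : Nat),
      TabInv m k σ.1 0 0 → σ.2.1 = (N : Int) →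
      TabInv m k ((List.range n).foldl
          (fun σ r => (List.range (m.getD r []).length).foldl (fun σ c => pvStepA m k r c σ) σ) σ).1 n 0 ∧
      ((List.range n).foldl
          (fun σ r => (List.range (m.getD r []).length).foldl (fun σ c => pvStepA m k r c σ) σ) σ).2.1 =
        (((List.range n).foldl
            (fun b r => (List.range (m.getD r []).length).foldl (fun b c => max b (side m k r c)) b) N : Nat) : Int) := by
  intro n
  induction n with
  | zero => intro _ σ N h1 h2; simpa using ⟨h1, h2⟩
  | succ n ih =>
    intro hn σ N h1 h2
    rw [List.range_succ, List.foldl_append, List.foldl_append]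
    simp only [List.foldl_cons, List.foldl_nil]
    obtain ⟨ihc1, ihc2⟩ := ih (by omega) σ N h1 h2
    have hinner := foldInnerA m k hpre (show n < m.length by omega)
      ((m.getD n []).length) le_rfl _ _ ihc1 ihc2
    exact ⟨TabInv_advance hinner.1, hinner.2⟩

theorem tabInv_init (m : List (List Int)) (k : Int) :
    TabInv m k (m.map (fun r => r.map (fun _ => (0 : Int)))) 0 0 := by
  refine ⟨by simp, ?_, ?_⟩
  · intro r' hr'
    simp [List.getD_eq_getElem?_getD, List.getElem?_map, List.getElem?_eq_getElem hr']
  · intro r' hr' c' hc'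
    rw [if_neg (by omega)]
    have h1 : pvGet2 (m.map fun r => r.map fun _ => (0 : Int)) r' c'
        = ((m[r']'hr').map (fun _ => (0 : Int))).getD c' 0 := by
      simp [pvGet2, List.getD_eq_getElem?_getD, List.getElem?_map, List.getElem?_eq_getElem hr']
    rw [h1, List.getD_eq_getElem?_getD, List.getElem?_map]
    rcases (m[r']'hr')[c']? <;> simp

theorem pvA_eq_ref (m : List (List Int)) (k : Int)
    (h : Pre_find_largest_square_submatrix_dp m k) :
    find_largest_square_submatrix_dp m k = (ref m k : Int) := by
  unfold find_largest_square_submatrix_dp ref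
  exact (foldOuterA m k h m.length le_rfl
    (m.map (fun r => r.map (fun _ => (0 : Int))), 0, none, none) 0
    (tabInv_init m k) rfl).2

-- B side: prefix-sum counts -------------------------------------------------

def indN (m : List (List Int)) (k : Int) (i j : Nat) : Int :=
  if cellKb m k i j = true then 1 else 0

def rcnt (m : List (List Int)) (k : Int) (i : Nat) : Nat → Int
  | 0 => 0
  | j+1 => rcnt m k i j + indN m k i j

def cnt (m : List (List Int)) (k : Int) : Nat → Nat → Int
  | 0, _ => 0
  | i+1, j => cnt m k i j + rcnt m k i j

theorem indN_le_one (m : List (List Int)) (k : Int) (i j : Nat) : indN m k i j ≤ 1 := by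
  unfold indN; split_ifs <;> omega

theorem indN_eq_one_iff (m : List (List Int)) (k : Int) (i j : Nat) :
    indN m k i j = 1 ↔ cellKb m k i j = true := by
  unfold indN; split_ifs with h <;> simp [h]

theorem rcnt_eq_sum (m : List (List Int)) (k : Int) (i j : Nat) :
    rcnt m k i j = ∑ x ∈ Finset.range j, indN m k i x := by
  induction j with
  | zero => simp [rcnt]
  | succ j ih => rw [Finset.sum_range_succ, ← ih]; rfl

theorem cnt_eq_sum (m : List (List Int)) (k : Int) (i j : Nat) :
    cnt m k i j = ∑ a ∈ Finset.range i, ∑ x ∈ Finset.range j, indN m k a x := by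
  induction i with
  | zero => simp [cnt]
  | succ i ih => rw [Finset.sum_range_succ, ← ih, ← rcnt_eq_sum]; rfl

theorem cnt_zero_right (m : List (List Int)) (k : Int) (i : Nat) : cnt m k i 0 = 0 := by
  simp [cnt_eq_sum]

theorem cnt_rec (m : List (List Int)) (k : Int) (i j : Nat) :
    cnt m k (i+1) (j+1) = indN m k i j + cnt m k i (j+1) + cnt m k (i+1) j - cnt m k i j := by
  show cnt m k i (j+1) + rcnt m k i (j+1) = _
  show cnt m k i (j+1) + (rcnt m k i j + indN m k i j)
      = indN m k i j + cnt m k i (j+1) + (cnt m k i j + rcnt m k i j) - cnt m k i j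
  ring

-- the prefix-sum build invariant: processed entries hold cnt, the rest 0
def PsInv (m : List (List Int)) (k : Int) (W : Nat) (ps : List (List Int)) (i j : Nat) : Prop :=
  ps.length = m.length + 1 ∧
  (∀ a ≤ m.length, (ps.getD a []).length = W + 1) ∧
  (∀ a ≤ m.length, ∀ b ≤ W,
    pvGet2 ps a b = if a = 0 ∨ b = 0 ∨ a - 1 < i ∨ (a - 1 = i ∧ b - 1 < j) then cnt m k a b else 0)

theorem psInv_init (m : List (List Int)) (k : Int) (W : Nat) :
    PsInv m k W (List.replicate (m.length+1) (List.replicate (W+1) (0 : Int))) 0 0 := by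
  refine ⟨by simp, ?_, ?_⟩
  · intro a ha
    rw [List.getD_eq_getElem?_getD, List.getElem?_replicate]
    rw [if_pos (by omega)]
    simp
  · intro a ha b hb
    have h1 : pvGet2 (List.replicate (m.length+1) (List.replicate (W+1) (0:Int))) a b = 0 := by
      have houter : (List.replicate (m.length+1) (List.replicate (W+1) (0:Int))).getD a []
          = List.replicate (W+1) (0:Int) := by
        rw [List.getD_eq_getElem?_getD, List.getElem?_replicate, if_pos (by omega)]
        rfl
      unfold pvGet2
      rw [houter, List.getD_eq_getElem?_getD, List.getElem?_replicate]
      split_ifs <;> simp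
    rw [h1]
    split_ifs with h
    · rcases h with h | h | h | h
      · subst h; simp [cnt]
      · subst h; rw [cnt_zero_right]
      · omega
      · omega
    · rfl

theorem stepPs_correct (m : List (List Int)) (k : Int) (W : Nat)
    {i j : Nat} (hi : i < m.length) (hj : j < W)
    {ps : List (List Int)} (hinv : PsInv m k W ps i j) :
    PsInv m k W (pvPsStep m k i j ps) i (j+1) := by
  obtain ⟨hlen, hrow, hval⟩ := hinv
  have hv : (if j < (m.getD i []).length ∧ (m.getD i []).getD j 0 = k then (1:Int) else 0)
      = indN m k i j := by
    unfold indN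
    by_cases h : j < (m.getD i []).length ∧ (m.getD i []).getD j 0 = k
    · rw [if_pos h, if_pos ((cellKb_iff m k i j).2 ⟨hi, h.1, h.2⟩)]
    · rw [if_neg h, if_neg]
      intro hx
      have := (cellKb_iff m k i j).1 hx
      exact h ⟨this.2.1, this.2.2⟩
  have e1 : pvGet2 ps i (j+1) = cnt m k i (j+1) := by
    rw [hval i (by omega) (j+1) (by omega), if_pos (by omega)]
  have e2 : pvGet2 ps (i+1) j = cnt m k (i+1) j := by
    rw [hval (i+1) (by omega) j (by omega)]
    by_cases hj0 : j = 0
    · subst hj0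
      rw [cnt_zero_right]
      split_ifs <;> rfl
    · rw [if_pos (by omega)]
  have e3 : pvGet2 ps i j = cnt m k i j := by
    rw [hval i (by omega) j (by omega)]
    by_cases hij : i = 0 ∨ j = 0
    · rcases hij with h | h
      · subst h; rw [if_pos (by omega)]
      · subst h
        rw [cnt_zero_right]
        split_ifs <;> rfl
    · rw [if_pos (by omega)]
  have hnew : (if j < (m.getD i []).length ∧ (m.getD i []).getD j 0 = k then (1:Int) else 0)
      + pvGet2 ps i (j+1) + pvGet2 ps (i+1) j - pvGet2 ps i j = cnt m k (i+1) (j+1) := by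
    rw [hv, e1, e2, e3, cnt_rec]
  have hilen : i + 1 < ps.length := by omega
  have hjlen : j + 1 < (ps.getD (i+1) []).length := by rw [hrow (i+1) (by omega)]; omega
  refine ⟨by rw [pvPsStep, pvSet2_length]; exact hlen,
    fun a ha => by rw [pvPsStep, pvSet2_rowlen]; exact hrow a ha, ?_⟩
  intro a ha b hb
  by_cases heq : a = i+1 ∧ b = j+1
  · obtain ⟨h1, h2⟩ := heq; subst h1; subst h2
    rw [pvPsStep, pvGet2_set2_self _ _ _ _ hilen hjlen, hnew, if_pos (by omega)]
  · rw [pvPsStep, pvGet2_set2_ne _ _ _ _ _ _ heq, hval a ha b hb]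
    have hiff : (a = 0 ∨ b = 0 ∨ a - 1 < i ∨ (a - 1 = i ∧ b - 1 < j)) ↔
        (a = 0 ∨ b = 0 ∨ a - 1 < i ∨ (a - 1 = i ∧ b - 1 < j + 1)) := by
      constructor <;> intro h <;> omega
    rw [if_congr hiff rfl rfl]

theorem foldInnerPs (m : List (List Int)) (k : Int) (W : Nat) {i : Nat} (hi : i < m.length) :
    ∀ (n : Nat), n ≤ W → ∀ (ps : List (List Int)), PsInv m k W ps i 0 →
      PsInv m k W ((List.range n).foldl (fun ps j => pvPsStep m k i j ps) ps) i n := by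
  intro n
  induction n with
  | zero => intro _ ps h; simpa using h
  | succ n ih =>
    intro hn ps h
    rw [List.range_succ, List.foldl_append]
    simp only [List.foldl_cons, List.foldl_nil]
    exact stepPs_correct m k W hi (by omega) (ih (by omega) ps h)

theorem psInv_advance {m : List (List Int)} {k : Int} {W : Nat} {ps : List (List Int)} {i : Nat}
    (h : PsInv m k W ps i W) : PsInv m k W ps (i+1) 0 := by
  obtain ⟨h1, h2, h3⟩ := h
  refine ⟨h1, h2, ?_⟩
  intro a ha b hb
  rw [h3 a ha b hb]
  have hiff : (a = 0 ∨ b = 0 ∨ a - 1 < i ∨ (a - 1 = i ∧ b - 1 < W)) ↔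
      (a = 0 ∨ b = 0 ∨ a - 1 < i + 1 ∨ (a - 1 = i + 1 ∧ b - 1 < 0)) := by
    constructor <;> intro h <;> omega
  rw [if_congr hiff rfl rfl]

theorem foldOuterPs (m : List (List Int)) (k : Int) (W : Nat) :
    ∀ (n : Nat), n ≤ m.length → ∀ (ps : List (List Int)), PsInv m k W ps 0 0 →
      PsInv m k W ((List.range n).foldl
        (fun ps i => (List.range W).foldl (fun ps j => pvPsStep m k i j ps) ps) ps) n 0 := by
  intro n
  induction n with
  | zero => intro _ ps h; simpa using h
  | succ n ih =>
    intro hn ps h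
    rw [List.range_succ, List.foldl_append]
    simp only [List.foldl_cons, List.foldl_nil]
    exact psInv_advance (foldInnerPs m k W (by omega) W le_rfl _ (ih (by omega) ps h))

theorem psFinal_eq (m : List (List Int)) (k : Int) (W : Nat) {ps : List (List Int)}
    (h : PsInv m k W ps m.length 0) :
    ∀ a ≤ m.length, ∀ b ≤ W, pvGet2 ps a b = cnt m k a b := by
  obtain ⟨_, _, h3⟩ := h
  intro a ha b hb
  rw [h3 a ha b hb]
  by_cases hab : a = 0 ∨ b = 0
  · rcases hab with h | h
    · subst h; rw [if_pos (by omega)]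
    · subst h
      rw [cnt_zero_right]
      split_ifs <;> rfl
  · rw [if_pos (by omega)]

-- the O(1) rectangle query answers "is the (b+1)-square ending at (r,c) all k?"
theorem query_iff (m : List (List Int)) (k : Int) {r c b : Nat} (hbr : b ≤ r) (hbc : b ≤ c) :
    (cnt m k (r+1) (c+1) - cnt m k (r-b) (c+1) - cnt m k (r+1) (c-b) + cnt m k (r-b) (c-b)
      = ((b:Int)+1) * ((b:Int)+1)) ↔ sqKb m k r c (b+1) = true := by
  have hsum : cnt m k (r+1) (c+1) - cnt m k (r-b) (c+1) - cnt m k (r+1) (c-b) + cnt m k (r-b) (c-b)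
      = ∑ a ∈ Finset.Ico (r-b) (r+1), ∑ x ∈ Finset.Ico (c-b) (c+1), indN m k a x := by
    have hin : ∀ a : Nat, ∑ x ∈ Finset.Ico (c-b) (c+1), indN m k a x
        = (∑ x ∈ Finset.range (c+1), indN m k a x) - ∑ x ∈ Finset.range (c-b), indN m k a x :=
      fun a => Finset.sum_Ico_eq_sub _ (by omega)
    rw [Finset.sum_congr rfl (fun a _ => hin a), Finset.sum_sub_distrib,
      Finset.sum_Ico_eq_sub _ (by omega : r-b ≤ r+1), Finset.sum_Ico_eq_sub _ (by omega : r-b ≤ r+1)]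
    simp only [cnt_eq_sum]
    ring
  have hcard : ∑ a ∈ Finset.Ico (r-b) (r+1), ∑ _x ∈ Finset.Ico (c-b) (c+1), (1:Int)
      = ((b:Int)+1) * ((b:Int)+1) := by
    rw [Finset.sum_const, Finset.sum_const, Nat.card_Ico, Nat.card_Ico]
    have e1 : r + 1 - (r - b) = b + 1 := by omega
    have e2 : c + 1 - (c - b) = b + 1 := by omega
    rw [e1, e2]
    ring
  have hdiff : ∑ a ∈ Finset.Ico (r-b) (r+1), ∑ x ∈ Finset.Ico (c-b) (c+1), (1 - indN m k a x)
      = ((b:Int)+1) * ((b:Int)+1)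
        - ∑ a ∈ Finset.Ico (r-b) (r+1), ∑ x ∈ Finset.Ico (c-b) (c+1), indN m k a x := by
    have : ∀ a : Nat, ∑ x ∈ Finset.Ico (c-b) (c+1), (1 - indN m k a x)
        = (∑ _x ∈ Finset.Ico (c-b) (c+1), (1:Int)) - ∑ x ∈ Finset.Ico (c-b) (c+1), indN m k a x :=
      fun a => Finset.sum_sub_distrib (f := fun _ => (1:Int)) (g := fun x => indN m k a x)
    rw [Finset.sum_congr rfl (fun a _ => this a), Finset.sum_sub_distrib, hcard]
  have hzero : (∑ a ∈ Finset.Ico (r-b) (r+1), ∑ x ∈ Finset.Ico (c-b) (c+1), (1 - indN m k a x) = 0)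
      ↔ ∀ a ∈ Finset.Ico (r-b) (r+1), ∀ x ∈ Finset.Ico (c-b) (c+1), indN m k a x = 1 := by
    rw [Finset.sum_eq_zero_iff_of_nonneg
      (fun a _ => Finset.sum_nonneg (fun x _ => by have := indN_le_one m k a x; omega))]
    constructor
    · intro h a ha x hx
      have := (Finset.sum_eq_zero_iff_of_nonneg
        (fun x _ => by have := indN_le_one m k a x; omega)).1 (h a ha) x hx
      omega
    · intro h a ha
      exact (Finset.sum_eq_zero_iff_of_nonneg
        (fun x _ => by have := indN_le_one m k a x; omega)).2
        (fun x hx => by have := h a ha x hx; omega)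
  have hall : (∀ a ∈ Finset.Ico (r-b) (r+1), ∀ x ∈ Finset.Ico (c-b) (c+1), indN m k a x = 1)
      ↔ sqKb m k r c (b+1) = true := by
    rw [sqKb_iff]
    constructor
    · intro h
      refine ⟨by omega, by omega, ?_⟩
      intro i hi j hj
      have ha : r - i ∈ Finset.Ico (r-b) (r+1) := by rw [Finset.mem_Ico]; omega
      have hx : c - j ∈ Finset.Ico (c-b) (c+1) := by rw [Finset.mem_Ico]; omega
      exact (indN_eq_one_iff m k _ _).1 (h _ ha _ hx)
    · intro h a ha x hx
      rw [Finset.mem_Ico] at ha hx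
      rw [indN_eq_one_iff]
      have e1 : a = r - (r - a) := by omega
      have e2 : x = c - (c - x) := by omega
      rw [e1, e2]
      exact h.2.2 (r - a) (by omega) (c - x) (by omega)
  rw [hsum, ← hall, ← hzero]
  omega

theorem grow_eq (m : List (List Int)) (k : Int) (W : Nat) {ps : List (List Int)}
    (hps : ∀ a ≤ m.length, ∀ b ≤ W, pvGet2 ps a b = cnt m k a b)
    {r c : Nat} (hr : r < m.length) (hc : c < W) :
    ∀ (fuel best : Nat), side m k r c ≤ best + fuel →
      pvGrow ps r c fuel best = max best (side m k r c) := by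
  have hcond : ∀ best : Nat, (best ≤ r ∧ best ≤ c ∧
      pvGet2 ps (r+1) (c+1) - pvGet2 ps (r-best) (c+1) - pvGet2 ps (r+1) (c-best)
        + pvGet2 ps (r-best) (c-best) = ((best : Int)+1) * ((best : Int)+1))
      ↔ best < side m k r c := by
    intro best
    constructor
    · rintro ⟨h1, h2, h3⟩
      rw [hps (r+1) (by omega) (c+1) (by omega), hps (r-best) (by omega) (c+1) (by omega),
        hps (r+1) (by omega) (c-best) (by omega), hps (r-best) (by omega) (c-best) (by omega)] at h3
      have hsq := (query_iff m k h1 h2).1 h3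
      have hle := (le_side_iff (best+1)).2 hsq
      omega
    · intro h
      have hsq := (le_side_iff (m := m) (k := k) (r := r) (c := c) (best+1)).1 (by omega)
      have hb := (sqKb_iff m k r c (best+1)).1 hsq
      refine ⟨by omega, by omega, ?_⟩
      rw [hps (r+1) (by omega) (c+1) (by omega), hps (r-best) (by omega) (c+1) (by omega),
        hps (r+1) (by omega) (c-best) (by omega), hps (r-best) (by omega) (c-best) (by omega)]
      exact (query_iff m k (by omega) (by omega)).2 hsq
  intro fuel
  induction fuel with
  | zero =>
    intro best hb
    simp only [pvGrow]
    exact (Nat.max_eq_left (by omega)).symm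
  | succ fuel ih =>
    intro best hb
    by_cases h : best < side m k r c
    · rw [pvGrow, if_pos ((hcond best).2 h), ih (best+1) (by omega),
        Nat.max_eq_right (by omega), Nat.max_eq_right (by omega)]
    · rw [pvGrow, if_neg (fun hx => h ((hcond best).1 hx))]
      exact (Nat.max_eq_left (by omega)).symm

theorem width_bound (m : List (List Int)) :
    ∀ r < m.length, (m.getD r []).length ≤ m.foldl (fun w row => max w row.length) 0 := by
  have haux : ∀ (l : List (List Int)) (init : Nat),
      init ≤ l.foldl (fun w row => max w row.length) init ∧
      (∀ row ∈ l, row.length ≤ l.foldl (fun w row => max w row.length) init) := by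
    intro l
    induction l with
    | nil => intro init; exact ⟨le_rfl, by simp⟩
    | cons x xs ih =>
      intro init
      constructor
      · exact le_trans (le_max_left _ _) (ih (max init x.length)).1
      · intro row hrow
        rcases List.mem_cons.1 hrow with h | h
        · subst h
          exact le_trans (le_max_right _ _) (ih (max init row.length)).1
        · exact (ih (max init x.length)).2 row h
  intro r hr
  have hmem : m.getD r [] ∈ m := by
    rw [List.getD_eq_getElem?_getD, List.getElem?_eq_getElem hr]
    exact List.getElem_mem hr
  exact (haux m 0).2 _ hmem

theorem pvB_eq_ref (m : List (List Int)) (k : Int) :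
    find_largest_square_submatrix_dp_alt m k = (ref m k : Int) := by
  have hps := psFinal_eq m k (m.foldl (fun w row => max w row.length) 0)
    (foldOuterPs m k (m.foldl (fun w row => max w row.length) 0) m.length le_rfl _
      (psInv_init m k (m.foldl (fun w row => max w row.length) 0)))
  have hrfl : find_largest_square_submatrix_dp_alt m k =
      (((List.range m.length).foldl
        (fun b r => (List.range (m.getD r []).length).foldl
          (fun b c => pvGrow
            ((List.range m.length).foldl
              (fun ps i => (List.range (m.foldl (fun w row => max w row.length) 0)).foldl
                (fun ps j => pvPsStep m k i j ps) ps)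
              (List.replicate (m.length+1)
                (List.replicate ((m.foldl (fun w row => max w row.length) 0)+1) (0 : Int))))
            r c (r+2) b)
          b)
        0 : Nat) : Int) := rfl
  rw [hrfl]
  unfold ref
  congr 1
  apply PySem.List.foldl_congr_mem
  intro b r hr
  have hrlt : r < m.length := List.mem_range.1 hr
  apply PySem.List.foldl_congr_mem
  intro bb c hcm
  have hclt : c < (m.getD r []).length := List.mem_range.1 hcm
  have hcW : c < m.foldl (fun w row => max w row.length) 0 :=
    lt_of_lt_of_le hclt (width_bound m r hrlt)
  have hside : side m k r c ≤ r + 1 := by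
    have := side_le m k r c
    omega
  exact grow_eq m k (m.foldl (fun w row => max w row.length) 0) hps hrlt hcW (r+2) bb (by omega)

-- ===== VERDICT (by name: the statement is the Claim_ definition above) =====
theorem find_largest_square_submatrix_dp_spec : Claim_equal_find_largest_square_submatrix_dp := by
  intro m k _ hpre
  unfold Spec_find_largest_square_submatrix_dp
  rw [pvA_eq_ref m k hpre, pvB_eq_ref]
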